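-- pv_equiv track=rewrite | github.com/kjnh10/pcw | work/atcoder/abc018/D/answers/834135_kenseiQ.py | d_valentine
-- ===== SOURCE A (Python) =====
-- def d_valentine(N, M, P, Q, R, C):
--     """
--     N:女子の人数
--     M:男子の人数
--     P,Q:女子P人、男子Q人からなるグループを作る
--     R:N人の女子が持っているチョコレートの個数
--     C:チョコレートに関する情報
--       (持っている女子の出席番号,渡したい男子の出席番号,渡せた場合の幸福度)
--     """
--     from itertools import combinations
--
--     # choco[i][j]には、i+1番の女子がj+1番の男子にチョコを渡せたときの幸福度を格納
--     choco = [[0] * M for _ in range(N)]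
--     for row in C:
--         choco[row[0] - 1][row[1] - 1] = row[2]
--
--     ans = 0
--     for girl in combinations(range(N), P):
--          # target[j]は、girlのグループにj番目の男子を入れたときの幸福度の和
--         target = [0] * M
--         for i in girl:
--             for j in range(M):
--                 target[j] += choco[i][j]
--         # 幸福度を高くする男子を上からQ人貪欲に取ればよい
--         ans = max(ans, sum(sorted(target, reverse=True)[:Q]))
--     return ans
-- ===== SOURCE B (Python) =====
-- def d_valentine(N, M, P, Q, R, C):
--     # Lazily allocated per-girl rows and a pruned choose/skip recursion over the
--     # girls, instead of a dense N x M matrix and itertools.combinations.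
--     rows = [None] * N
--     for g, m, h in C:
--         if rows[g - 1] is None:
--             rows[g - 1] = [0] * M
--         rows[g - 1][m - 1] = h
--
--     def score(chosen):
--         totals = [0] * M
--         for i in chosen:
--             row = rows[i]
--             if row is not None:
--                 for j in range(M):
--                     totals[j] += row[j]
--         totals.sort(reverse=True)
--         return sum(totals[:Q])
--
--     def best(i, need, chosen):
--         if need == 0:
--             return score(chosen)
--         if need > N - i:
--             return None
--         take = best(i + 1, need - 1, chosen + [i])
--         skip = best(i + 1, need, chosen)
--         if take is None:
--             return skip
--         if skip is None:
--             return take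
--         return max(take, skip)
--
--     r = best(0, P, [])
--     return 0 if r is None else max(0, r)
-- ===== Notes on version B (the rewrite author's own statement) =====
-- stated objective: alternative
-- what changed: Replaces the dense N*M matrix, itertools.combinations and per-girl row accumulation with lazily allocated per-girl rows and a pruned choose/skip recursion over the girls that maximises directly, skipping girls who own no chocolate when accumulating a group's per-boy totals.
import Mathlib
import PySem

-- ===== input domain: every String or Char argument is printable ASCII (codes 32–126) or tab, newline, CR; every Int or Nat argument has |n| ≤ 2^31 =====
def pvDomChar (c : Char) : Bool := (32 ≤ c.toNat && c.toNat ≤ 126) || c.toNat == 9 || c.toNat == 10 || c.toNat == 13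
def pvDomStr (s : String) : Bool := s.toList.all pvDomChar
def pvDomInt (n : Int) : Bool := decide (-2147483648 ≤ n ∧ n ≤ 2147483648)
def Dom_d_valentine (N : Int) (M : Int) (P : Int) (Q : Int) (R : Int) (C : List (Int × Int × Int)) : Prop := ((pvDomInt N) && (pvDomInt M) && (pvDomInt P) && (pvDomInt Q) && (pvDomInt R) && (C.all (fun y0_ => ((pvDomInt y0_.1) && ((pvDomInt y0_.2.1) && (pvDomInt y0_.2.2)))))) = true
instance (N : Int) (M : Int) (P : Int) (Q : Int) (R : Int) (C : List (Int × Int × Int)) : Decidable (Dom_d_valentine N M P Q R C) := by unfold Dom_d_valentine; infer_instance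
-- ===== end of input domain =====

-- B replaces A's dense N×M matrix + itertools.combinations by lazily allocated per-girl rows
-- and a pruned choose/skip recursion over the girls (objective: alternative).

-- ===== PORT A =====
-- itertools.combinations(xs, k) over a list, in itertools' lexicographic order
def combsA : List Nat → Nat → List (List Nat)
  | _, 0 => [[]]
  | [], _ + 1 => []
  | x :: xs, k + 1 =>
    -- itertools.combinations yields nothing at all when r exceeds the number of remaining elements
    if xs.length < k then []
    else (combsA xs k).map (x :: ·) ++ combsA xs (k + 1)

-- choco[row[0]-1][row[1]-1] = row[2]; a Python list index i with -len ≤ i < len addresses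
-- cell i % len, which the mod-reduced Nat index computes (exact on Pre_'s in-window indices;
-- the 0 < N ∧ 0 < M guard only totalizes mod — Python raises IndexError outside the window,
-- excluded by Pre_)
def chocoStep (N M : Int) (mat : List (List Int)) (row : Int × Int × Int) : List (List Int) :=
  if 0 < N ∧ 0 < M then
    mat.set (PySem.Int.mod (row.1 - 1) N).toNat
      ((mat.getD (PySem.Int.mod (row.1 - 1) N).toNat []).set (PySem.Int.mod (row.2.1 - 1) M).toNat row.2.2)
  else mat

def d_valentine (N : Int) (M : Int) (P : Int) (Q : Int) (R : Int) (C : List (Int × Int × Int)) : Int :=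
  let choco := C.foldl (chocoStep N M) (List.replicate N.toNat (List.replicate M.toNat 0))
  -- for girl in combinations(range(N), P): target[j] += choco[i][j]; ans = max(ans, sum(sorted(target, reverse=True)[:Q]))
  (combsA (List.range N.toNat) P.toNat).foldl
    (fun ans girl =>
      let target := girl.foldl (fun t i => List.zipWith (· + ·) t (choco.getD i [])) (List.replicate M.toNat 0)
      max ans (PySem.List.slice (PySem.List.sorted target (fun x => x) true) none (some Q)).sum)
    0

-- ===== PORT B =====
-- if rows[g-1] is None: rows[g-1] = [0]*M;  rows[g-1][m-1] = h.  Python's list index i with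
-- -len ≤ i < len addresses cell i % len, which the mod-reduced Nat index computes (exact on
-- Pre_'s in-window indices; the 0 < N ∧ 0 < M guard only totalizes mod — Python raises
-- IndexError outside the window, excluded by Pre_)
def rowStep (N M : Int) (rows : List (Option (List Int))) (row : Int × Int × Int) : List (Option (List Int)) :=
  if 0 < N ∧ 0 < M then
    let gi := (PySem.Int.mod (row.1 - 1) N).toNat
    let r0 := match rows.getD gi none with
      | none => List.replicate M.toNat 0
      | some r => r
    rows.set gi (some (r0.set (PySem.Int.mod (row.2.1 - 1) M).toNat row.2.2))
  else rows

-- totals[j] += row[j] for allocated rows only; totals.sort(reverse=True); sum(totals[:Q])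
def scoreB (M : Nat) (Q : Int) (rows : List (Option (List Int))) (chosen : List Nat) : Int :=
  let totals := chosen.foldl (fun t i =>
      match rows.getD i none with
      | none => t
      | some r => List.zipWith (· + ·) t r) (List.replicate M 0)
  (PySem.List.slice (PySem.List.sorted totals (fun x => x) true) none (some Q)).sum

-- best(i, need, chosen): choose/skip recursion over the girls
def bestB (M : Nat) (Q : Int) (rows : List (Option (List Int))) (N : Nat) :
    Nat → Nat → List Nat → Option Int
  | _, 0, chosen => some (scoreB M Q rows chosen)
  | i, need + 1, chosen =>
    if _ : N - i < need + 1 then none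
    else
      match bestB M Q rows N (i + 1) need (chosen ++ [i]),
            bestB M Q rows N (i + 1) (need + 1) chosen with
      | none, s => s
      | some a, none => some a
      | some a, some b => some (max a b)
  termination_by i need _ => N - i
  decreasing_by all_goals omega

def d_valentine_alt (N : Int) (M : Int) (P : Int) (Q : Int) (R : Int) (C : List (Int × Int × Int)) : Int :=
  let rows := C.foldl (rowStep N M) (List.replicate N.toNat none)
  match bestB M.toNat Q rows N.toNat 0 P.toNat [] with
  | none => 0
  | some r => max 0 r

-- ===== PRECONDITION & SPEC =====
-- Pre_ is exactly A's returning domain: P ≥ 0 (combinations raises ValueError for P < 0) and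
-- every chocolate's girl/boy index inside Python's valid index window -len ≤ i-1 < len
-- (IndexError outside it).
def Pre_d_valentine (N : Int) (M : Int) (P : Int) (Q : Int) (R : Int) (C : List (Int × Int × Int)) : Prop :=
  0 ≤ P ∧ ∀ r ∈ C, 1 - N ≤ r.1 ∧ r.1 ≤ N ∧ 1 - M ≤ r.2.1 ∧ r.2.1 ≤ M
instance (N : Int) (M : Int) (P : Int) (Q : Int) (R : Int) (C : List (Int × Int × Int)) : Decidable (Pre_d_valentine N M P Q R C) := by unfold Pre_d_valentine; infer_instance

def pvWitness_d_valentine : Int × Int × Int × Int × Int × (List (Int × Int × Int)) :=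
  (2, 2, 1, 1, 2, [(1, 1, 3), (2, 2, 4)])

def Spec_d_valentine (N : Int) (M : Int) (P : Int) (Q : Int) (R : Int) (C : List (Int × Int × Int)) (out : Int) : Prop := out = d_valentine_alt N M P Q R C
instance (N : Int) (M : Int) (P : Int) (Q : Int) (R : Int) (C : List (Int × Int × Int)) (out : Int) : Decidable (Spec_d_valentine N M P Q R C out) := by unfold Spec_d_valentine; infer_instance

-- ===== CLAIM (what is proved, stated in full; the proofs are below) =====
def Claim_equal_d_valentine : Prop := ∀ (N : Int) (M : Int) (P : Int) (Q : Int) (R : Int) (C : List (Int × Int × Int)), Dom_d_valentine N M P Q R C → Pre_d_valentine N M P Q R C → Spec_d_valentine N M P Q R C (d_valentine N M P Q R C)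

-- ===== LEMMAS AND PROOFS =====

-- B's lazily allocated row, read back as the dense row it stands for
def unwrapRow (Mn : Nat) : Option (List Int) → List Int
  | none => List.replicate Mn 0
  | some r => r

-- max over a list, the shape both folds reduce to
def omax : List Int → Option Int
  | [] => none
  | x :: xs => some (xs.foldl max x)

lemma foldl_max_shift (xs : List Int) : ∀ z x : Int, xs.foldl max (max z x) = max z (xs.foldl max x) := by
  induction xs with
  | nil => intro z x; rfl
  | cons y ys ih => intro z x; simp only [List.foldl_cons, max_assoc]; exact ih z (max x y)

lemma omax_cons (x : Int) (l : List Int) :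
    omax (x :: l) = some (match omax l with | none => x | some r => max x r) := by
  cases l with
  | nil => rfl
  | cons y ys => simp only [omax, List.foldl_cons, foldl_max_shift]

lemma omax_append (l1 l2 : List Int) :
    omax (l1 ++ l2) = (match omax l1, omax l2 with
      | none, s => s | some a, none => some a | some a, some b => some (max a b)) := by
  induction l1 with
  | nil => cases h : omax l2 <;> simp only [List.nil_append, h] <;> rfl
  | cons x l1 ih =>
    rw [List.cons_append, omax_cons, ih, omax_cons]
    cases omax l1 <;> cases omax l2 <;> simp [max_assoc]

lemma foldl_max_omax {α : Type} (f : α → Int) (L : List α) :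
    ∀ z : Int, L.foldl (fun a s => max a (f s)) z
      = (match omax (L.map f) with | none => z | some r => max z r) := by
  induction L with
  | nil => intro z; rfl
  | cons x xs ih =>
    intro z
    rw [List.foldl_cons, List.map_cons, omax_cons, ih (max z (f x))]
    cases omax (xs.map f) <;> simp [max_assoc]

lemma combsA_nil (xs : List Nat) (k : Nat) (h : xs.length < k) : combsA xs k = [] := by
  match xs, k with
  | _, 0 => omega
  | [], k + 1 => rfl
  | x :: xs, k + 1 => simp only [List.length_cons] at h; simp [combsA, show xs.length < k by omega]

lemma combsA_cons (x : Nat) (xs : List Nat) (k : Nat) :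
    combsA (x :: xs) (k + 1) = (combsA xs k).map (x :: ·) ++ combsA xs (k + 1) := by
  by_cases h : xs.length < k
  · simp [combsA, h, combsA_nil xs k h, combsA_nil xs (k + 1) (by omega)]
  · simp [combsA, h]

-- membership in combinations
lemma combsA_mem : ∀ (xs : List Nat) (k : Nat) (c : List Nat), c ∈ combsA xs k → ∀ i ∈ c, i ∈ xs := by
  intro xs
  induction xs with
  | nil => intro k c hc i hi; cases k with
    | zero => simp [combsA] at hc; simp [hc] at hi
    | succ k => simp [combsA] at hc
  | cons x xs ih =>
    intro k c hc i hi
    cases k with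
    | zero => simp [combsA] at hc; simp [hc] at hi
    | succ k =>
      rw [combsA_cons] at hc
      simp only [List.mem_append, List.mem_map] at hc
      rcases hc with ⟨c', hc', rfl⟩ | hc
      · rcases List.mem_cons.1 hi with rfl | hi
        · exact List.mem_cons_self
        · exact List.mem_cons_of_mem _ (ih k c' hc' i hi)
      · exact List.mem_cons_of_mem _ (ih (k+1) c hc i hi)

-- bestB computes omax of scoreB over the remaining combinations
lemma bestB_eq (M : Nat) (Q : Int) (rows : List (Option (List Int))) (N : Nat) :
    ∀ (fuel i : Nat), N - i = fuel → ∀ (need : Nat) (chosen : List Nat),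
      bestB M Q rows N i need chosen
        = omax ((combsA (List.range' i (N - i)) need).map
            (fun c => scoreB M Q rows (chosen ++ c))) := by
  intro fuel
  induction fuel with
  | zero =>
    intro i hi need chosen
    rw [hi, List.range'_zero]
    cases need with
    | zero => simp [bestB, combsA, omax]
    | succ need => simp [bestB, combsA, omax, show N - i < need + 1 by omega]
  | succ fuel ih =>
    intro i hi need chosen
    cases need with
    | zero => rw [hi, List.range'_succ]; simp [bestB, combsA, omax]
    | succ need =>
      by_cases hsh : N - i < need + 1
      · rw [bestB]
        simp only [hsh, dif_pos]
        rw [combsA_nil _ _ (by simp [List.length_range']; omega)]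
        rfl
      have hiN : i < N := by omega
      have h1 : N - (i + 1) = fuel := by omega
      rw [hi, List.range'_succ, combsA_cons, List.map_append, omax_append, List.map_map]
      have hmap : ((fun c => scoreB M Q rows (chosen ++ c)) ∘ (i :: ·))
          = (fun c => scoreB M Q rows ((chosen ++ [i]) ++ c)) := by
        funext c
        show scoreB M Q rows (chosen ++ (i :: c)) = _
        rw [List.append_cons]
      rw [hmap]
      rw [bestB]
      simp only [hsh, dif_neg, not_false_iff]
      rw [ih (i+1) h1 need (chosen ++ [i]), ih (i+1) h1 (need+1) chosen, h1]

-- getD after set, with any default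
lemma getD_set {α : Type} (xs : List α) (gi i : Nat) (v d : α) :
    (xs.set gi v).getD i d = if i = gi ∧ gi < xs.length then v else xs.getD i d := by
  by_cases h : gi < xs.length
  · by_cases he : i = gi
    · subst he; simp [List.getD_eq_getElem?_getD, h]
    · simp [List.getD_eq_getElem?_getD, List.getElem?_set_ne (fun hc => he hc.symm), he]
  · rw [List.set_eq_of_length_le (by omega), if_neg (fun hc => h hc.2)]

-- A's dense matrix and B's lazy rows stay in step while the chocolates are written
lemma build_inv (N M : Int) :
    ∀ (C : List (Int × Int × Int)) (mat : List (List Int)) (rows : List (Option (List Int))),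
      (∀ r ∈ C, 1 - N ≤ r.1 ∧ r.1 ≤ N ∧ 1 - M ≤ r.2.1 ∧ r.2.1 ≤ M) →
      mat.length = N.toNat →
      rows.length = N.toNat →
      (∀ i, i < N.toNat → (mat.getD i []).length = M.toNat) →
      (∀ i, i < N.toNat → mat.getD i [] = unwrapRow M.toNat (rows.getD i none)) →
      (C.foldl (chocoStep N M) mat).length = N.toNat ∧
      (∀ i, i < N.toNat → ((C.foldl (chocoStep N M) mat).getD i []).length = M.toNat) ∧
      (∀ i, i < N.toNat →
        (C.foldl (chocoStep N M) mat).getD i [] = unwrapRow M.toNat ((C.foldl (rowStep N M) rows).getD i none)) := by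
  intro C
  induction C with
  | nil => intro mat rows _ h1 h1' h2 h3; exact ⟨h1, h2, h3⟩
  | cons r C ih =>
    intro mat rows hr h1 h1' h2 h3
    obtain ⟨hg1, hg2, hm1, hm2⟩ := hr r List.mem_cons_self
    have hN : (0 : Int) < N := by omega
    have hM : (0 : Int) < M := by omega
    have hgi0 : 0 ≤ PySem.Int.mod (r.1 - 1) N := PySem.Int.mod_nonneg _ hN
    have hgiN : PySem.Int.mod (r.1 - 1) N < N := PySem.Int.mod_lt _ hN
    have hgilt : (PySem.Int.mod (r.1 - 1) N).toNat < N.toNat := by omega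
    have hstepA : chocoStep N M mat r
        = mat.set (PySem.Int.mod (r.1 - 1) N).toNat
            ((mat.getD (PySem.Int.mod (r.1 - 1) N).toNat []).set (PySem.Int.mod (r.2.1 - 1) M).toNat r.2.2) := by
      rw [chocoStep, if_pos ⟨hN, hM⟩]
    have hstepB : rowStep N M rows r
        = rows.set (PySem.Int.mod (r.1 - 1) N).toNat
            (some ((unwrapRow M.toNat (rows.getD (PySem.Int.mod (r.1 - 1) N).toNat none)).set
              (PySem.Int.mod (r.2.1 - 1) M).toNat r.2.2)) := by
      rw [rowStep, if_pos ⟨hN, hM⟩]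
      rfl
    simp only [List.foldl_cons]
    apply ih
    · exact fun r' hr' => hr r' (List.mem_cons_of_mem _ hr')
    · rw [hstepA, List.length_set]; exact h1
    · rw [hstepB, List.length_set]; exact h1'
    · intro i hi
      rw [hstepA, getD_set]
      split_ifs with he
      · rw [List.length_set]; exact h2 _ (h1 ▸ he.2)
      · exact h2 _ hi
    · intro i hi
      rw [hstepA, hstepB, getD_set, getD_set, h1, h1']
      split_ifs with he
      · rw [h3 _ he.2]
        rfl
      · exact h3 _ hi

-- adding an all-zero dense row is the identity (the row B never allocated)
lemma zip_zero (t : List Int) (Mn : Nat) (h : t.length = Mn) :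
    List.zipWith (· + ·) t (List.replicate Mn 0) = t := by
  apply List.ext_getElem
  · simp [h]
  · intro k h1 h2
    simp

-- the per-group accumulation folds of A and B produce the same dense totals
lemma foldB_eq (Mn : Nat) (mat : List (List Int)) (rows : List (Option (List Int)))
    (girl : List Nat)
    (hlen : ∀ i ∈ girl, (mat.getD i []).length = Mn)
    (heq : ∀ i ∈ girl, mat.getD i [] = unwrapRow Mn (rows.getD i none)) :
    ∀ t : List Int, t.length = Mn →
      girl.foldl (fun t i =>
          match rows.getD i none with
          | none => t
          | some r => List.zipWith (· + ·) t r) t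
        = girl.foldl (fun t i => List.zipWith (· + ·) t (mat.getD i [])) t := by
  induction girl with
  | nil => intro t _; rfl
  | cons i girl ih =>
    intro t ht
    have hi := heq i List.mem_cons_self
    have hil := hlen i List.mem_cons_self
    simp only [List.foldl_cons]
    cases h : rows.getD i none with
    | none =>
      rw [h] at hi
      simp only [unwrapRow] at hi
      rw [hi, zip_zero t Mn ht]
      exact ih (fun j hj => hlen j (List.mem_cons_of_mem _ hj))
        (fun j hj => heq j (List.mem_cons_of_mem _ hj)) t ht
    | some r =>
      rw [h] at hi
      simp only [unwrapRow] at hi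
      rw [← hi]
      exact ih (fun j hj => hlen j (List.mem_cons_of_mem _ hj))
        (fun j hj => heq j (List.mem_cons_of_mem _ hj)) _
        (by rw [List.length_zipWith, ht, hil]; omega)

-- per-girl score equality and final assembly
theorem d_valentine_spec : Claim_equal_d_valentine := by
  intro N M P Q R C _ hpre
  obtain ⟨hP, hrows⟩ := hpre
  unfold Spec_d_valentine d_valentine d_valentine_alt
  obtain ⟨hlen, hrowlen, hagree⟩ :=
    build_inv N M C (List.replicate N.toNat (List.replicate M.toNat 0)) (List.replicate N.toNat none)
      hrows List.length_replicate List.length_replicate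
      (by intro i hi; simp [List.getD_eq_getElem?_getD, hi])
      (by intro i hi; simp [List.getD_eq_getElem?_getD, hi, unwrapRow])
  -- the per-combination scores agree
  have hscore : ∀ girl ∈ combsA (List.range N.toNat) P.toNat,
      (PySem.List.slice (PySem.List.sorted
          (girl.foldl (fun t i => List.zipWith (· + ·) t
            ((C.foldl (chocoStep N M) (List.replicate N.toNat (List.replicate M.toNat 0))).getD i []))
            (List.replicate M.toNat 0)) (fun x => x) true) none (some Q)).sum
        = scoreB M.toNat Q (C.foldl (rowStep N M) (List.replicate N.toNat none)) girl := by
    intro girl hgirl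
    have hmem : ∀ i ∈ girl, i < N.toNat :=
      fun i hi => List.mem_range.1 (combsA_mem _ _ _ hgirl i hi)
    have hfold := foldB_eq M.toNat
      (C.foldl (chocoStep N M) (List.replicate N.toNat (List.replicate M.toNat 0)))
      (C.foldl (rowStep N M) (List.replicate N.toNat none)) girl
      (fun i hi => hrowlen i (hmem i hi))
      (fun i hi => hagree i (hmem i hi))
      (List.replicate M.toNat 0) List.length_replicate
    unfold scoreB
    rw [hfold]
  -- both sides are omax over the same list of scores
  rw [show (List.range N.toNat) = List.range' 0 N.toNat from List.range_eq_range']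
    at hscore
  have hB := bestB_eq M.toNat Q (C.foldl (rowStep N M) (List.replicate N.toNat none)) N.toNat N.toNat 0
    (by omega) P.toNat []
  rw [Nat.sub_zero] at hB
  have hA := foldl_max_omax
    (fun girl => (PySem.List.slice (PySem.List.sorted
        (girl.foldl (fun t i => List.zipWith (· + ·) t
          ((C.foldl (chocoStep N M) (List.replicate N.toNat (List.replicate M.toNat 0))).getD i []))
          (List.replicate M.toNat 0)) (fun x => x) true) none (some Q)).sum)
    (combsA (List.range' 0 N.toNat) P.toNat) 0
  rw [show (List.range N.toNat) = List.range' 0 N.toNat from List.range_eq_range', hA]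
  have hmapeq : (combsA (List.range' 0 N.toNat) P.toNat).map
      (fun girl => (PySem.List.slice (PySem.List.sorted
        (girl.foldl (fun t i => List.zipWith (· + ·) t
          ((C.foldl (chocoStep N M) (List.replicate N.toNat (List.replicate M.toNat 0))).getD i []))
          (List.replicate M.toNat 0)) (fun x => x) true) none (some Q)).sum)
      = (combsA (List.range' 0 N.toNat) P.toNat).map
        (fun c => scoreB M.toNat Q (C.foldl (rowStep N M) (List.replicate N.toNat none)) ([] ++ c)) := by
    apply List.map_congr_left
    intro girl hgirl
    rw [List.nil_append]
    exact hscore girl hgirl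
  rw [hmapeq, ← hB]
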